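-- pv_equiv track=rewrite | github.com/samfeldman824/putr | poker_utils.py | get_extreme_names
-- ===== SOURCE A (Python) =====
-- def get_extreme_names(amount_dict: dict):
--             min_names = []
--             max_names = []
--             min_amount = float('inf')
--             max_amount = float('-inf')
--
--             for name, amount in amount_dict.items():
--                 if amount == max_amount:
--                     max_names.append(name)
--                 elif amount > max_amount:
--                     max_names = [name]
--                     max_amount = amount
--
--                 if amount == min_amount:
--                     min_names.append(name)
--                 elif amount < min_amount:
--                     min_names = [name]
--                     min_amount = amount
--
--             return max_names, min_names
-- ===== SOURCE B (Python) =====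
-- def get_extreme_names(amount_dict: dict):
--     if not amount_dict:
--         return [], []
--     max_amount = max(amount_dict.values())
--     min_amount = min(amount_dict.values())
--     max_names = [n for n, a in amount_dict.items() if a == max_amount]
--     min_names = [n for n, a in amount_dict.items() if a == min_amount]
--     return max_names, min_names
-- ===== Notes on version B (the rewrite author's own statement) =====
-- stated objective: simpler
-- what changed: A tracks four pieces of running state (two name lists reset/appended and two running extrema seeded with float infinities) in one loop; B guards the empty dict, takes max/min of the values with the builtins, and builds each name list with a single comprehension.
import Mathlib
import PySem

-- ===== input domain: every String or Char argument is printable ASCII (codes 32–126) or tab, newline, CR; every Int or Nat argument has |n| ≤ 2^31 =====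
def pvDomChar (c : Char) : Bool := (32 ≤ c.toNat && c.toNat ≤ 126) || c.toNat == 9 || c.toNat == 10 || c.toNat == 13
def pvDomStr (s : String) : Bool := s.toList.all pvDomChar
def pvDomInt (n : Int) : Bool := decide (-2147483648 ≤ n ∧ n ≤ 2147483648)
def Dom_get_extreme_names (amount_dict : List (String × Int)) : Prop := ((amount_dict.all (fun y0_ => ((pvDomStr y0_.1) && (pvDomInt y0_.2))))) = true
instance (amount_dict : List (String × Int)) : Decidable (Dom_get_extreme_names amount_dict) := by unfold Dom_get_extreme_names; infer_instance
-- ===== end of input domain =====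

-- B replaces A's single loop over four pieces of running state (extrema seeded with float
-- infinities) by an empty-guard, two builtin max/min reductions and two filtering passes;
-- objective: simpler.


-- ===== PORT A =====
-- A's running extrema start at float('-inf')/float('inf'); an Int amount is never == to them
-- and always strictly beyond them, so they are modelled exactly by Option Int with none = not
-- yet set (first iteration always takes the strict branch).  pvStepMax/pvStepMin are the two
-- independent halves of A's loop body, in A's branch order.
def pvStepMax (s : List String × Option Int) (x : String × Int) : List String × Option Int :=
  match s.2 with
  | some M => if x.2 = M then (s.1 ++ [x.1], some M)
              else if x.2 > M then ([x.1], some x.2)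
              else (s.1, some M)
  | none => ([x.1], some x.2)

def pvStepMin (s : List String × Option Int) (x : String × Int) : List String × Option Int :=
  match s.2 with
  | some m => if x.2 = m then (s.1 ++ [x.1], some m)
              else if x.2 < m then ([x.1], some x.2)
              else (s.1, some m)
  | none => ([x.1], some x.2)

def pvStepA (s : List String × Option Int × List String × Option Int) (x : String × Int) :
    List String × Option Int × List String × Option Int :=
  ((pvStepMax (s.1, s.2.1) x).1, (pvStepMax (s.1, s.2.1) x).2, pvStepMin s.2.2 x)

def get_extreme_names (amount_dict : List (String × Int)) : List String × List String :=
  let s := amount_dict.foldl pvStepA ([], none, [], none)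
  (s.1, s.2.2.1)

-- ===== PORT B =====
def get_extreme_names_alt (amount_dict : List (String × Int)) : List String × List String :=
  match PySem.List.max? (amount_dict.map Prod.snd) (fun y => y),
        PySem.List.min? (amount_dict.map Prod.snd) (fun y => y) with
  | some M, some m =>
      ((amount_dict.filter (fun p => p.2 == M)).map Prod.fst,
       (amount_dict.filter (fun p => p.2 == m)).map Prod.fst)
  | _, _ => ([], [])

-- ===== PRECONDITION & SPEC =====
def Spec_get_extreme_names (amount_dict : List (String × Int)) (out : List String × List String) : Prop := out = get_extreme_names_alt amount_dict
instance (amount_dict : List (String × Int)) (out : List String × List String) : Decidable (Spec_get_extreme_names amount_dict out) := by unfold Spec_get_extreme_names; infer_instance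

-- ===== CLAIM (what is proved, stated in full; the proofs are below) =====
def Claim_equal_get_extreme_names : Prop := ∀ (amount_dict : List (String × Int)), Dom_get_extreme_names amount_dict → Spec_get_extreme_names amount_dict (get_extreme_names amount_dict)

-- ===== LEMMAS AND PROOFS =====

/-- A's loop is the product of its two independent halves. -/
lemma pv_split : ∀ (l : List (String × Int)) (a b : List String × Option Int),
    l.foldl pvStepA (a.1, a.2, b) =
      ((l.foldl pvStepMax a).1, (l.foldl pvStepMax a).2, l.foldl pvStepMin b) := by
  intro l
  induction l with
  | nil => intro a b; simp
  | cons x t ih =>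
    intro a b
    simp only [List.foldl_cons, pvStepA]
    exact ih _ _

/-- The max half from a seeded state: final extremum is the running max of the seed, and the
name list is the seed list (kept iff the seed survives) followed by the later ties. -/
lemma pv_charMax : ∀ (t : List (String × Int)) (M : Int) (maxN : List String),
    t.foldl pvStepMax (maxN, some M) =
      ((if (t.map Prod.snd).foldl max M = M then maxN else []) ++
        (t.filter (fun p => p.2 == (t.map Prod.snd).foldl max M)).map Prod.fst,
       some ((t.map Prod.snd).foldl max M)) := by
  intro t
  induction t with
  | nil => intro M maxN; simp
  | cons x t ih =>
    intro M maxN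
    simp only [List.foldl_cons, List.map_cons, List.filter_cons]
    rcases lt_trichotomy x.2 M with h | h | h
    · have h1 : max M x.2 = M := max_eq_left h.le
      have h2 : ¬ x.2 = (t.map Prod.snd).foldl max M := by
        have := (PySem.List.le_foldl_max (t.map Prod.snd) M).1
        omega
      simp only [pvStepMax, if_neg (ne_of_lt h), if_neg (not_lt.mpr h.le)]
      rw [ih]
      simp [h1, h2]
    · subst h
      simp only [pvStepMax, if_true, max_self]
      rw [ih]
      have hle := (PySem.List.le_foldl_max (t.map Prod.snd) x.2).1
      by_cases hF : (t.map Prod.snd).foldl max x.2 = x.2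
      · simp [hF, List.append_assoc]
      · have : (x.2 == (t.map Prod.snd).foldl max x.2) = false := by
          simp only [beq_eq_false_iff_ne, ne_eq]; omega
        simp [hF, this]
    · have h1 : max M x.2 = x.2 := max_eq_right h.le
      have hle := (PySem.List.le_foldl_max (t.map Prod.snd) x.2).1
      have hF : ¬ (t.map Prod.snd).foldl max x.2 = M := by omega
      simp only [pvStepMax, if_neg (ne_of_gt h), if_pos h]
      rw [ih]
      simp only [h1]
      have hxm : ¬ (x.2 : Int) = M := by omega
      by_cases hx : (t.map Prod.snd).foldl max x.2 = x.2
      · simp [hx, hxm]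
      · have : (x.2 == (t.map Prod.snd).foldl max x.2) = false := by
          simp only [beq_eq_false_iff_ne, ne_eq]; omega
        simp [hx, hF, this]

/-- The min half, symmetrically. -/
lemma pv_charMin : ∀ (t : List (String × Int)) (m : Int) (minN : List String),
    t.foldl pvStepMin (minN, some m) =
      ((if (t.map Prod.snd).foldl min m = m then minN else []) ++
        (t.filter (fun p => p.2 == (t.map Prod.snd).foldl min m)).map Prod.fst,
       some ((t.map Prod.snd).foldl min m)) := by
  intro t
  induction t with
  | nil => intro m minN; simp
  | cons x t ih =>
    intro m minN
    simp only [List.foldl_cons, List.map_cons, List.filter_cons]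
    rcases lt_trichotomy m x.2 with h | h | h
    · have h1 : min m x.2 = m := min_eq_left h.le
      have h2 : ¬ x.2 = (t.map Prod.snd).foldl min m := by
        have := (PySem.List.foldl_min_le (t.map Prod.snd) m).1
        omega
      simp only [pvStepMin, if_neg (ne_of_gt h), if_neg (not_lt.mpr h.le)]
      rw [ih]
      simp [h1, h2]
    · subst h
      simp only [pvStepMin, if_true, min_self]
      rw [ih]
      have hle := (PySem.List.foldl_min_le (t.map Prod.snd) x.2).1
      by_cases hF : (t.map Prod.snd).foldl min x.2 = x.2
      · simp [hF, List.append_assoc]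
      · have : (x.2 == (t.map Prod.snd).foldl min x.2) = false := by
          simp only [beq_eq_false_iff_ne, ne_eq]; omega
        simp [hF, this]
    · have h1 : min m x.2 = x.2 := min_eq_right h.le
      have hle := (PySem.List.foldl_min_le (t.map Prod.snd) x.2).1
      have hF : ¬ (t.map Prod.snd).foldl min x.2 = m := by omega
      simp only [pvStepMin, if_neg (ne_of_lt h), if_pos h]
      rw [ih]
      simp only [h1]
      have hxm : ¬ (x.2 : Int) = m := by omega
      by_cases hx : (t.map Prod.snd).foldl min x.2 = x.2
      · simp [hx, hxm]
      · have : (x.2 == (t.map Prod.snd).foldl min x.2) = false := by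
          simp only [beq_eq_false_iff_ne, ne_eq]; omega
        simp [hx, hF, this]

-- ===== VERDICT (by name: the statement is the Claim_ definition above) =====
theorem get_extreme_names_spec : Claim_equal_get_extreme_names := by
  unfold Claim_equal_get_extreme_names
  intro d _
  unfold Spec_get_extreme_names
  cases d with
  | nil => rfl
  | cons x t =>
    show get_extreme_names (x :: t) = get_extreme_names_alt (x :: t)
    have hstep : pvStepA ([], none, [], none) x = ([x.1], some x.2, [x.1], some x.2) := rfl
    have hA : get_extreme_names (x :: t)
        = ((t.foldl pvStepMax ([x.1], some x.2)).1, (t.foldl pvStepMin ([x.1], some x.2)).1) := by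
      simp only [get_extreme_names, List.foldl_cons, hstep]
      rw [pv_split t ([x.1], some x.2) ([x.1], some x.2)]
    rw [hA, pv_charMax, pv_charMin]
    have hmax : PySem.List.max? ((x :: t).map Prod.snd) (fun y => y)
        = some ((t.map Prod.snd).foldl max x.2) := by
      simp only [List.map_cons]; exact PySem.List.max?_id_cons x.2 (t.map Prod.snd)
    have hmin : PySem.List.min? ((x :: t).map Prod.snd) (fun y => y)
        = some ((t.map Prod.snd).foldl min x.2) := by
      simp only [List.map_cons]; exact PySem.List.min?_id_cons x.2 (t.map Prod.snd)
    simp only [get_extreme_names_alt, hmax, hmin, List.filter_cons]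
    refine Prod.ext ?_ ?_
    · by_cases hF : (t.map Prod.snd).foldl max x.2 = x.2
      · simp [hF]
      · have : (x.2 == (t.map Prod.snd).foldl max x.2) = false := by
          simp only [beq_eq_false_iff_ne, ne_eq]; omega
        simp [hF, this]
    · by_cases hF : (t.map Prod.snd).foldl min x.2 = x.2
      · simp [hF]
      · have : (x.2 == (t.map Prod.snd).foldl min x.2) = false := by
          simp only [beq_eq_false_iff_ne, ne_eq]; omega
        simp [hF, this]
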